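-- pv_equiv track=rewrite | github.com/tethal/aoc | 2025/01.py | part1
-- ===== SOURCE A (Python) =====
-- def parse(src):
--     return [int(l[1:]) if l[0] == 'R' else -int(l[1:]) for l in src.splitlines()]
--
-- def part1(src):
--     value = 50
--     result = 0
--     for r in parse(src):
--         value = (value + r) % 100
--         if value == 0:
--             result += 1
--     return result
-- ===== SOURCE B (Python) =====
-- def part1(src):
--     # Divide-and-conquer: split the delta list in half; each call returns
--     # (number of zero hits given entry offset t, total sum of the segment).
--     # A position hits zero iff (50 + t + local prefix sum) % 100 == 0.
--     ds = [int(l[1:]) if l[0] == 'R' else -int(l[1:]) for l in src.splitlines()]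
--
--     def go(ds, t):
--         if not ds:
--             return (0, 0)
--         if len(ds) == 1:
--             d = ds[0]
--             return ((1 if (50 + t + d) % 100 == 0 else 0), d)
--         mid = len(ds) // 2
--         h1, s1 = go(ds[:mid], t)
--         h2, s2 = go(ds[mid:], t + s1)
--         return (h1 + h2, s1 + s2)
--
--     return go(ds, 0)[0]
-- ===== Notes on version B (the rewrite author's own statement) =====
-- stated objective: alternative
-- what changed: B replaces A's left-to-right loop that re-reduces a cyclic position mod 100 each step by a divide-and-conquer recursion: split the delta list in half, each call returns (zero-hit count for a given entry offset, segment sum), and the halves are combined by offsetting the right half with the left half's sum.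
import Mathlib
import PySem

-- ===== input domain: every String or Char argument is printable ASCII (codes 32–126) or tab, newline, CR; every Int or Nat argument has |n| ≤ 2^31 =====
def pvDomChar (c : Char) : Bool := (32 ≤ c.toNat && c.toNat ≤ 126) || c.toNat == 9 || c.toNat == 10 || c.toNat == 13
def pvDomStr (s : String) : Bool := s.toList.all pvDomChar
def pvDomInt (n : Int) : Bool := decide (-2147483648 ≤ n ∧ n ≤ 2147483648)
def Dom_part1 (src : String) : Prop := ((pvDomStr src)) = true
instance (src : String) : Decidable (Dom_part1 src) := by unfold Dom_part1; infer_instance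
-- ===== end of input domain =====

-- B replaces A's left-to-right mod-100 loop by a divide-and-conquer recursion over the
-- delta list returning (zero-hit count for an entry offset, segment sum); alternative, not faster.

-- ===== PORT A =====
-- parse: [int(l[1:]) if l[0] == 'R' else -int(l[1:]) for l in src.splitlines()]
-- (shared verbatim by A and B; under Pre_ every line is nonempty and l[1:] parses, so getD 0 is never the default)
def pvParseLine (l : List Char) : Int :=
  if PySem.List.pyGet? l 0 = some 'R' then (PySem.Int.ofChars? (PySem.List.slice l (some 1) none)).getD 0
  else -((PySem.Int.ofChars? (PySem.List.slice l (some 1) none)).getD 0)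

def pvParse (src : String) : List Int :=
  (PySem.Chars.splitlines src.toList).map pvParseLine

def part1 (src : String) : Int :=
  ((pvParse src).foldl
    (fun (st : Int × Int) r =>
      let value := PySem.Int.mod (st.1 + r) 100
      (value, if value = 0 then st.2 + 1 else st.2))
    ((50 : Int), (0 : Int))).2

-- ===== PORT B =====
-- go(ds, t): divide and conquer; ds[:mid] / ds[mid:] with 0 ≤ mid ≤ len(ds) are exactly take/drop.
def pvGo : List Int → Int → Int × Int
  | [], _ => (0, 0)
  | [d], t => ((if PySem.Int.mod (50 + t + d) 100 = 0 then (1 : Int) else 0), d)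
  | d1 :: d2 :: rest, t =>
    let ds := d1 :: d2 :: rest
    let mid := ds.length / 2
    let p1 := pvGo (ds.take mid) t
    let p2 := pvGo (ds.drop mid) (t + p1.2)
    (p1.1 + p2.1, p1.2 + p2.2)
  termination_by ds _ => ds.length
  decreasing_by
  · simp [List.length_take]; omega
  · simp [List.length_drop]; omega

def part1_alt (src : String) : Int := (pvGo (pvParse src) 0).1

-- ===== PRECONDITION & SPEC =====
-- Pre_ excludes exactly the inputs where Python A raises: an empty line (IndexError on l[0])
-- or a line whose tail is not a valid int literal (ValueError in int(l[1:])).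
def Pre_part1 (src : String) : Prop :=
  ∀ l ∈ PySem.Chars.splitlines src.toList,
    l ≠ [] ∧ (PySem.Int.ofChars? (PySem.List.slice l (some 1) none)).isSome = true
instance (src : String) : Decidable (Pre_part1 src) := by unfold Pre_part1; infer_instance
def pvWitness_part1 : String := "R50\nL100\nR100"

def Spec_part1 (src : String) (out : Int) : Prop := out = part1_alt src
instance (src : String) (out : Int) : Decidable (Spec_part1 src out) := by unfold Spec_part1; infer_instance

-- ===== CLAIM (what is proved, stated in full; the proofs are below) =====
def Claim_equal_part1 : Prop := ∀ (src : String), Dom_part1 src → Pre_part1 src → Spec_part1 src (part1 src)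

-- ===== LEMMAS AND PROOFS =====

/-- Number of positions in `ds` (entered with raw offset `t`) whose cyclic value is 0. -/
def pvZ (t : Int) : List Int → Int
  | [] => 0
  | d :: ds => (if PySem.Int.mod (50 + t + d) 100 = 0 then (1 : Int) else 0) + pvZ (t + d) ds

lemma pvZ_append (xs ys : List Int) (t : Int) :
    pvZ t (xs ++ ys) = pvZ t xs + pvZ (t + xs.sum) ys := by
  induction xs generalizing t with
  | nil => simp [pvZ]
  | cons x xs ih => simp [pvZ, ih, add_assoc]

lemma pvGo_eq_aux (n : Nat) : ∀ (ds : List Int) (t : Int), ds.length ≤ n →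
    pvGo ds t = (pvZ t ds, ds.sum) := by
  induction n with
  | zero =>
    intro ds t h
    have : ds = [] := by cases ds <;> simp_all
    subst this; simp [pvGo, pvZ]
  | succ n ih =>
    intro ds t h
    match ds with
    | [] => simp [pvGo, pvZ]
    | [d] => simp [pvGo, pvZ]
    | d1 :: d2 :: rest =>
      rw [pvGo]
      have hlen : (d1 :: d2 :: rest).length = rest.length + 2 := by simp
      have h1 : (List.take ((d1 :: d2 :: rest).length / 2) (d1 :: d2 :: rest)).length ≤ n := by
        simp only [List.length_take, hlen] at *; omega
      have h2 : (List.drop ((d1 :: d2 :: rest).length / 2) (d1 :: d2 :: rest)).length ≤ n := by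
        simp only [List.length_drop, hlen] at *; omega
      rw [ih _ t h1, ih _ _ h2]
      have hsplit := List.take_append_drop ((d1 :: d2 :: rest).length / 2) (d1 :: d2 :: rest)
      dsimp only
      rw [Prod.mk.injEq]
      constructor
      · conv_rhs => rw [← hsplit, pvZ_append]
      · conv_rhs => rw [← hsplit]
        simp

lemma pvGo_eq (ds : List Int) (t : Int) : pvGo ds t = (pvZ t ds, ds.sum) :=
  pvGo_eq_aux ds.length ds t (le_refl _)

lemma pv_mod_comb (a d : Int) :
    PySem.Int.mod (PySem.Int.mod a 100 + d) 100 = PySem.Int.mod (a + d) 100 := by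
  rw [PySem.Int.mod_eq_emod_of_pos (b := 100) (by norm_num),
      PySem.Int.mod_eq_emod_of_pos (b := 100) (by norm_num),
      PySem.Int.mod_eq_emod_of_pos (b := 100) (by norm_num)]
  omega

lemma pv_keyA (ds : List Int) (t res : Int) :
    (ds.foldl
      (fun (st : Int × Int) r =>
        let value := PySem.Int.mod (st.1 + r) 100
        (value, if value = 0 then st.2 + 1 else st.2))
      (PySem.Int.mod (50 + t) 100, res)).2
    = res + pvZ t ds := by
  induction ds generalizing t res with
  | nil => simp [pvZ]
  | cons d ds ih =>
    have h : PySem.Int.mod (PySem.Int.mod (50 + t) 100 + d) 100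
        = PySem.Int.mod (50 + (t + d)) 100 := by
      rw [pv_mod_comb]; ring_nf
    have h' : PySem.Int.mod (50 + (t + d)) 100 = PySem.Int.mod (50 + t + d) 100 := by ring_nf
    simp only [List.foldl, h, pvZ, ih (t + d)]
    rw [h']
    split_ifs <;> ring

-- ===== VERDICT (by name: the statement is the Claim_ definition above) =====
theorem part1_spec : Claim_equal_part1 := by
  intro src _ _
  show part1 src = part1_alt src
  unfold part1 part1_alt
  have h50 : (50 : Int) = PySem.Int.mod (50 + 0) 100 := by decide
  rw [h50, pv_keyA (pvParse src) 0 0, pvGo_eq]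
  simp
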